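-- pv_equiv track=rewrite | github.com/Lim3nius/aoc2020 | Day_17/main.py | recursive_index_change
-- ===== SOURCE A (Python) =====
-- def recursive_index_change(pos):
--     if len(pos) == 1:
--         return [(pos[0] - 1,), (pos[0] + 0,), (pos[0] + 1,)]
--
--     res = []
--     changes = recursive_index_change(pos[1:])
--     for i in [-1, 0, 1]:
--         for c in changes:
--             res.append((pos[0] + i, *c))
--
--     return res
-- ===== SOURCE B (Python) =====
-- from itertools import product
--
-- def recursive_index_change(pos):
--     return [tuple(p + d for p, d in zip(pos, deltas))
--             for deltas in product((-1, 0, 1), repeat=len(pos))]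
-- ===== Notes on version B (the rewrite author's own statement) =====
-- stated objective: idiomatic
-- what changed: Replaces the explicit recursion over the tail of pos with a flat itertools.product enumeration of all delta combinations zipped against pos, which yields the same lexicographic order.
import Mathlib
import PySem

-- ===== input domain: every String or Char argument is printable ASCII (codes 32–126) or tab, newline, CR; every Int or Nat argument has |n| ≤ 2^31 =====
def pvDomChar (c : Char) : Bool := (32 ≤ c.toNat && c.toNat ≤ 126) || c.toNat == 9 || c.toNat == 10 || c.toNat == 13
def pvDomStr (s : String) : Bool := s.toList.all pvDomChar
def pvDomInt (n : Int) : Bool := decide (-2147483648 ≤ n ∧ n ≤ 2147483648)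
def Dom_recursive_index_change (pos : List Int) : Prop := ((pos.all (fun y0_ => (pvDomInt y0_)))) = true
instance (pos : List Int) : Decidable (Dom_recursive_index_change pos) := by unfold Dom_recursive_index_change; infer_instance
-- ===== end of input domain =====

-- B replaces A's recursion over pos[1:] with a flat itertools.product enumeration zipped
-- against pos (idiomatic); the return values agree on every non-empty list.

-- ===== PORT A =====
-- A recurses: base case len(pos)==1, otherwise prepend pos[0]+i to each tuple of the
-- recursive result, for i in [-1,0,1].  On [] Python never reaches the base case and
-- raises RecursionError; that input is excluded by Pre_ and the port returns [] there.
def recursive_index_change (pos : List Int) : List (List Int) :=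
  match pos with
  | [] => []   -- Python raises RecursionError here; excluded by Pre_
  | [x] => [[x - 1], [x + 0], [x + 1]]
  | x :: rest =>
      let changes := recursive_index_change rest
      ([-1, 0, 1] : List Int).foldl
        (fun res i => changes.foldl (fun r c => r ++ [(x + i) :: c]) res) []

-- ===== PORT B =====
-- product((-1,0,1), repeat=n): leftmost factor varies slowest
def pvProdRep : Nat → List (List Int)
  | 0 => [[]]
  | n + 1 => ([-1, 0, 1] : List Int).flatMap (fun d => (pvProdRep n).map (fun t => d :: t))

def recursive_index_change_alt (pos : List Int) : List (List Int) :=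
  (pvProdRep pos.length).map (fun deltas => List.zipWith (fun p d => p + d) pos deltas)

-- ===== PRECONDITION & SPEC =====
-- Pre_ excludes only the empty list, on which Python A raises RecursionError.
def Pre_recursive_index_change (pos : List Int) : Prop := pos ≠ []
instance (pos : List Int) : Decidable (Pre_recursive_index_change pos) := by
  unfold Pre_recursive_index_change; infer_instance
def pvWitness_recursive_index_change : List Int := [3, -1]

def Spec_recursive_index_change (pos : List Int) (out : List (List Int)) : Prop :=
  out = recursive_index_change_alt pos
instance (pos : List Int) (out : List (List Int)) : Decidable (Spec_recursive_index_change pos out) := by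
  unfold Spec_recursive_index_change; infer_instance

-- ===== CLAIM (what is proved, stated in full; the proofs are below) =====
def Claim_equal_recursive_index_change : Prop := ∀ (pos : List Int), Dom_recursive_index_change pos → Pre_recursive_index_change pos → Spec_recursive_index_change pos (recursive_index_change pos)
-- ===== LEMMAS AND PROOFS =====

theorem flatten_map_single {α β : Type} (f : α → β) (l : List α) :
    (l.map (fun a => [f a])).flatten = l.map f := by
  induction l with
  | nil => rfl
  | cons a l ih => simp [ih]

theorem alt_cons (x : Int) (rest : List Int) :
    recursive_index_change_alt (x :: rest) =
      ([-1, 0, 1] : List Int).flatMap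
        (fun d => (recursive_index_change_alt rest).map (fun t => (x + d) :: t)) := by
  simp [recursive_index_change_alt, pvProdRep, List.map_map, Function.comp_def]

theorem rec_eq_alt : ∀ (pos : List Int), pos ≠ [] →
    recursive_index_change pos = recursive_index_change_alt pos := by
  intro pos
  induction pos with
  | nil => intro h; exact absurd rfl h
  | cons x rest ih =>
    intro _
    cases rest with
    | nil =>
      simp [recursive_index_change, recursive_index_change_alt, pvProdRep, sub_eq_add_neg]
    | cons y ys =>
      have hrest : recursive_index_change (y :: ys) = recursive_index_change_alt (y :: ys) :=
        ih (by simp)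
      rw [alt_cons]
      show (let changes := recursive_index_change (y :: ys);
        ([-1, 0, 1] : List Int).foldl
          (fun res i => changes.foldl (fun r c => r ++ [(x + i) :: c]) res) []) = _
      simp [hrest, List.foldl, List.flatMap, flatten_map_single]

-- ===== VERDICT (by name: the statement is the Claim_ definition above) =====
theorem recursive_index_change_spec : Claim_equal_recursive_index_change := by
  intro pos _ hpre
  unfold Spec_recursive_index_change
  exact rec_eq_alt pos hpre
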